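-- pv_equiv track=rewrite | github.com/djbazza/Visual_Nav_Aid | AtomMatrix/main.py | rotMatrix
-- ===== SOURCE A (Python) =====
-- def rotMatrix(m, q):
--     if q == 1:
--         for o in range(5):
--             m[(o*5)-5] = 0
--     elif q == 5:
--         for o in range(5):
--             m[o] = 0
--     for a in range(q):
--         m.insert(len(m) - 1, m.pop(0))
--     return m
-- ===== SOURCE B (Python) =====
-- def rotMatrix(m, q):
--     # Mutates m in place like the original; the zeroing prologue is unchanged,
--     # the rotation is done with one slice reassignment instead of q single steps.
--     if q == 1:
--         for o in range(5):
--             m[(o*5)-5] = 0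
--     elif q == 5:
--         for o in range(5):
--             m[o] = 0
--     if q > 0:
--         r = q % len(m)
--         m[:] = m[r:] + m[:r]
--     return m
-- ===== Notes on version B (the rewrite author's own statement) =====
-- stated objective: faster
-- what changed: A rotates by performing q separate pop(0)+insert single-step rotations; B computes r = q % len(m) once and produces the rotated list with one slice reassignment m[:] = m[r:] + m[:r]; the zeroing prologue is kept as is. Pre_ excludes only inputs on which A raises IndexError (q=1 with fewer than 16 elements, q=5 with fewer than 5, positive q on an empty list).
import Mathlib
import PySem

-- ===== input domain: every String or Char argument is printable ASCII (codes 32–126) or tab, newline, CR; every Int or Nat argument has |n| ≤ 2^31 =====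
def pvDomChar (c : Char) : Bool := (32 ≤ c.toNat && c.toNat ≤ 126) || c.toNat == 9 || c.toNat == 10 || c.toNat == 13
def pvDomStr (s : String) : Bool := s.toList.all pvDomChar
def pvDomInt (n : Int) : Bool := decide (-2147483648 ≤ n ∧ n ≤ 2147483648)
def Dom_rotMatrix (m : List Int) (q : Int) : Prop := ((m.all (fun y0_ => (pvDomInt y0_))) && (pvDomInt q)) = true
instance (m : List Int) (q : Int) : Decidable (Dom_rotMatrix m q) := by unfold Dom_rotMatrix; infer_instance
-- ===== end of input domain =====

-- B keeps A's zeroing prologue and replaces A's q single-step rotations (each a pop(0)+insert)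
-- by one slice rotation by q % len(m); both mutate m in place in Python, the equivalence proved
-- here is about the return value.

-- ===== PORT A =====
-- one iteration of A's rotation loop: m.insert(len(m) - 1, m.pop(0))
-- (len(m) is evaluated before the pop; Python raises on pop from empty — totalised, excluded by Pre_)
def rotStepA (acc : List Int) : List Int :=
  let n : Int := (acc.length : Int)
  match PySem.List.pop? acc 0 with
  | some (v, rest) => PySem.List.insert rest (n - 1) v
  | none => acc

def rotMatrix (m : List Int) (q : Int) : List Int :=
  let m1 :=
    if q = 1 then
      (PySem.List.pyRange 0 5 1).foldl (fun acc o => PySem.List.pySetD acc (o * 5 - 5) 0) m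
    else if q = 5 then
      (PySem.List.pyRange 0 5 1).foldl (fun acc o => PySem.List.pySetD acc o 0) m
    else m
  (PySem.List.pyRange 0 q 1).foldl (fun acc _ => rotStepA acc) m1

-- ===== PORT B =====
def rotMatrix_alt (m : List Int) (q : Int) : List Int :=
  let m1 :=
    if q = 1 then
      (PySem.List.pyRange 0 5 1).foldl (fun acc o => PySem.List.pySetD acc (o * 5 - 5) 0) m
    else if q = 5 then
      (PySem.List.pyRange 0 5 1).foldl (fun acc o => PySem.List.pySetD acc o 0) m
    else m
  if 0 < q then
    let r := PySem.Int.mod q (m1.length : Int)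
    PySem.List.slice m1 (some r) none ++ PySem.List.slice m1 none (some r)
  else m1

-- ===== PRECONDITION & SPEC =====
-- Pre_ excludes exactly the inputs on which A raises IndexError: q = 1 with fewer than 16
-- elements, q = 5 with fewer than 5, and any positive q on the empty list (pop from empty).
def Pre_rotMatrix (m : List Int) (q : Int) : Prop :=
  (q = 1 → 16 ≤ m.length) ∧ (q = 5 → 5 ≤ m.length) ∧ (0 < q → m ≠ [])
instance (m : List Int) (q : Int) : Decidable (Pre_rotMatrix m q) := by
  unfold Pre_rotMatrix; infer_instance
def pvWitness_rotMatrix : List Int × Int := ([1, 2, 3], 2)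

def Spec_rotMatrix (m : List Int) (q : Int) (out : List Int) : Prop := out = rotMatrix_alt m q
instance (m : List Int) (q : Int) (out : List Int) : Decidable (Spec_rotMatrix m q out) := by
  unfold Spec_rotMatrix; infer_instance

-- ===== CLAIM (what is proved, stated in full; the proofs are below) =====
def Claim_equal_rotMatrix : Prop := ∀ (m : List Int) (q : Int), Dom_rotMatrix m q → Pre_rotMatrix m q → Spec_rotMatrix m q (rotMatrix m q)

-- ===== LEMMAS AND PROOFS =====

theorem rotStepA_cons (x : Int) (xs : List Int) : rotStepA (x :: xs) = xs ++ [x] := by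
  simp [rotStepA, PySem.List.pop?_zero_cons]
  have h := PySem.List.insert_natCast xs xs.length x (le_refl _)
  push_cast at h ⊢
  simp [h]

theorem foldl_const_iterate {α β : Type} (f : α → α) :
    ∀ (L : List β) (l : α), L.foldl (fun acc _ => f acc) l = f^[L.length] l := by
  intro L
  induction L with
  | nil => intro l; simp
  | cons b L ih => intro l; simp [List.foldl, ih, Function.iterate_succ_apply]

theorem iterate_rotStepA (k : Nat) :
    ∀ (l : List Int), l ≠ [] → rotStepA^[k] l = l.rotate k := by
  induction k with
  | zero => intro l _; simp
  | succ k ih =>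
    intro l hl
    match l with
    | x :: xs =>
      rw [Function.iterate_succ_apply, rotStepA_cons,
        ih (xs ++ [x]) (by simp), List.rotate_cons_succ]

theorem rot_loop_eq (l : List Int) (q : Int) (hl : l ≠ []) (hq : 0 < q) :
    (PySem.List.pyRange 0 q 1).foldl (fun acc _ => rotStepA acc) l =
      PySem.List.slice l (some (PySem.Int.mod q (l.length : Int))) none ++
        PySem.List.slice l none (some (PySem.Int.mod q (l.length : Int))) := by
  have hlen : 0 < l.length := List.length_pos_iff.mpr hl
  have hmod : PySem.Int.mod q (l.length : Int) = ((q.toNat % l.length : Nat) : Int) := by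
    rw [PySem.Int.mod_eq_emod_of_pos (by exact_mod_cast hlen)]
    have : q = (q.toNat : Int) := (Int.toNat_of_nonneg hq.le).symm
    rw [this]
    exact_mod_cast rfl
  rw [foldl_const_iterate, PySem.List.length_pyRange_one,
    iterate_rotStepA _ l hl, hmod, PySem.List.slice_from_natCast,
    PySem.List.slice_to_natCast]
  have hle : q.toNat % l.length ≤ l.length := (Nat.mod_lt _ hlen).le
  have : (q - 0).toNat = q.toNat := by omega
  rw [this, ← List.rotate_mod, List.rotate_eq_drop_append_take hle]

theorem length_zero1 (m : List Int) :
    (((PySem.List.pyRange 0 5 1).foldl (fun acc o => PySem.List.pySetD acc (o * 5 - 5) 0) m)).length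
      = m.length := by
  have hr : PySem.List.pyRange 0 5 1 = [0, 1, 2, 3, 4] := by decide
  simp [hr, List.foldl, PySem.List.length_pySetD]

theorem length_zero5 (m : List Int) :
    (((PySem.List.pyRange 0 5 1).foldl (fun acc o => PySem.List.pySetD acc o 0) m)).length
      = m.length := by
  have hr : PySem.List.pyRange 0 5 1 = [0, 1, 2, 3, 4] := by decide
  simp [hr, List.foldl, PySem.List.length_pySetD]

-- ===== VERDICT (by name: the statement is the Claim_ definition above) =====
theorem rotMatrix_spec : Claim_equal_rotMatrix := by
  intro m q _ hpre
  obtain ⟨h1, h5, hpos⟩ := hpre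
  unfold Spec_rotMatrix rotMatrix rotMatrix_alt
  by_cases hq : 0 < q
  · rw [if_pos hq]
    have hm : m ≠ [] := hpos hq
    by_cases hq1 : q = 1
    · subst hq1
      simp only [reduceIte]
      exact rot_loop_eq _ 1 (by
        have := h1 rfl
        refine List.ne_nil_of_length_pos ?_
        rw [length_zero1]
        omega) (by norm_num)
    · by_cases hq5 : q = 5
      · subst hq5
        rw [if_neg hq1]
        simp only [reduceIte]
        exact rot_loop_eq _ 5 (by
          have := h5 rfl
          refine List.ne_nil_of_length_pos ?_
          rw [length_zero5]
          omega) (by norm_num)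
      · simp only [if_neg hq1, if_neg hq5]
        exact rot_loop_eq m q hm hq
  · rw [if_neg hq]
    have hr : PySem.List.pyRange 0 q 1 = [] := by
      rw [PySem.List.pyRange_one]
      have hz : (q - 0).toNat = 0 := by omega
      rw [hz]
      simp
    rw [hr]
    rfl
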